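-- pv_equiv track=rewrite | github.com/XiaoHuNao/event-docs-generator | event-docs-generator.py | _method_param_slot_indices
-- ===== SOURCE A (Python) =====
-- def _method_param_slot_indices(desc: str, is_static: bool) -> list[int]:
--     if not desc.startswith("("):
--         return []
--     end = desc.find(")")
--     if end == -1:
--         return []
--     args_desc = desc[1:end]
--     indices: list[int] = []
--     slot = 0 if is_static else 1
--     i = 0
--     while i < len(args_desc):
--         indices.append(slot)
--         ch = args_desc[i]
--         if ch == "[":
--             while i < len(args_desc) and args_desc[i] == "[":
--                 i += 1
--             if i < len(args_desc) and args_desc[i] == "L":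
--                 semi = args_desc.find(";", i)
--                 if semi == -1:
--                     break
--                 i = semi + 1
--             else:
--                 i += 1
--             slot += 1
--             continue
--         if ch == "L":
--             semi = args_desc.find(";", i)
--             if semi == -1:
--                 break
--             i = semi + 1
--             slot += 1
--             continue
--         if ch in ("J", "D"):
--             i += 1
--             slot += 2
--             continue
--         i += 1
--         slot += 1
--     return indices
-- ===== SOURCE B (Python) =====
-- def _method_param_slot_indices(desc: str, is_static: bool) -> list[int]:
--     if not desc.startswith("("):
--         return []
--     end = desc.find(")")
--     if end == -1:
--         return []
--     # First pass: one slot-width per parameter, in descriptor order.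
--     widths: list[int] = []
--     s = desc[1:end]
--     while s:
--         if s[0] == "[":
--             t = s.lstrip("[")
--             if t.startswith("L"):
--                 sem = t.find(";")
--                 if sem == -1:
--                     widths.append(1)
--                     break
--                 s = t[sem + 1:]
--             else:
--                 s = t[1:]
--             widths.append(1)
--         elif s[0] == "L":
--             sem = s.find(";")
--             if sem == -1:
--                 widths.append(1)
--                 break
--             s = s[sem + 1:]
--             widths.append(1)
--         elif s[0] in "JD":
--             s = s[1:]
--             widths.append(2)
--         else:
--             s = s[1:]
--             widths.append(1)
--     # Second pass: running slot counter over the widths.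
--     out: list[int] = []
--     slot = 0 if is_static else 1
--     for w in widths:
--         out.append(slot)
--         slot += w
--     return out
-- ===== Notes on version B (the rewrite author's own statement) =====
-- stated objective: alternative
-- what changed: A's single index-chasing while-loop that interleaves parsing with slot counting is split into two passes: a tokenizer over the argument descriptor producing one slot-width per parameter (consuming prefixes of the string), then a running-slot fold over the widths list.
import Mathlib
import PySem

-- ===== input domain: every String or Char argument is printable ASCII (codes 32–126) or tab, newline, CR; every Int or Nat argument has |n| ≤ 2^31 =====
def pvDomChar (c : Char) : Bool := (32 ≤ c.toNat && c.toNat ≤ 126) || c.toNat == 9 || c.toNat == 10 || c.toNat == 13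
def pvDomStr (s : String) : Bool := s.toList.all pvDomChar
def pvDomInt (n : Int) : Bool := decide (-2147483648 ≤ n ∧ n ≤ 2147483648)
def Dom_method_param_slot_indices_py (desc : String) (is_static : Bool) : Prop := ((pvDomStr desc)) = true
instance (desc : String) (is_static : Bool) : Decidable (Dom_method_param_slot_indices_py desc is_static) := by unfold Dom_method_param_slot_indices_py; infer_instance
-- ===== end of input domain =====

-- B replaces A's single index-chasing while-loop by two passes — a tokenizer producing one
-- slot-width per parameter, then a running-slot scan over the widths (objective: alternative
-- decomposition, same cost); return values proved equal on all inputs.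

-- ===== PORT A =====

-- inner 'while i < len(args_desc) and args_desc[i] == "[": i += 1' of A
def pvSkipA (args : List Char) (i : Nat) : Nat :=
  if i < args.length ∧ args[i]? = some '[' then pvSkipA args (i + 1) else i
termination_by args.length - i
decreasing_by
  rename_i h; omega

theorem pvSkipA_ge (args : List Char) (i : Nat) : i ≤ pvSkipA args i := by
  unfold pvSkipA
  split
  · have := pvSkipA_ge args (i + 1); omega
  · exact le_refl i
termination_by args.length - i
decreasing_by rename_i h; omega

theorem pvSkipA_le (args : List Char) (i : Nat) (h : i ≤ args.length) :
    pvSkipA args i ≤ args.length := by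
  unfold pvSkipA
  split
  · rename_i hg; exact pvSkipA_le args (i + 1) (by omega)
  · exact h
termination_by args.length - i
decreasing_by rename_i h'; omega

-- the main while-loop of A: i the cursor, slot the running slot, acc the indices list;
-- A's locals ch/semi are inlined (the 'if i < len and args[i] == "L"' guard becomes args[j]? = some 'L')
def pvLoopA (args : List Char) (i : Nat) (slot : Int) (acc : List Int) : List Int :=
  if hi : i < args.length then
    if args[i] = '[' then
      if args[pvSkipA args i]? = some 'L' then
        if hsemi : PySem.Chars.findFrom args [';'] ((pvSkipA args i : Nat) : Int) = -1 then
          acc ++ [slot]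
        else
          pvLoopA args ((PySem.Chars.findFrom args [';'] ((pvSkipA args i : Nat) : Int)).toNat + 1)
            (slot + 1) (acc ++ [slot])
      else pvLoopA args (pvSkipA args i + 1) (slot + 1) (acc ++ [slot])
    else if args[i] = 'L' then
      if hsemi : PySem.Chars.findFrom args [';'] ((i : Nat) : Int) = -1 then
        acc ++ [slot]
      else
        pvLoopA args ((PySem.Chars.findFrom args [';'] ((i : Nat) : Int)).toNat + 1)
          (slot + 1) (acc ++ [slot])
    else if args[i] = 'J' ∨ args[i] = 'D' then
      pvLoopA args (i + 1) (slot + 2) (acc ++ [slot])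
    else pvLoopA args (i + 1) (slot + 1) (acc ++ [slot])
  else acc
termination_by args.length - i
decreasing_by
  · -- '[' then 'L' then ';' found: the found index is ≥ pvSkipA args i ≥ i
    have hj : pvSkipA args i ≤ args.length := pvSkipA_le args i (by omega)
    have hji : i ≤ pvSkipA args i := pvSkipA_ge args i
    have hspec := PySem.Chars.findFrom_natCast_spec args [';'] (pvSkipA args i) hj hsemi
    have h1 := hspec.1
    omega
  · have hji : i ≤ pvSkipA args i := pvSkipA_ge args i
    omega
  · have hspec := PySem.Chars.findFrom_natCast_spec args [';'] i (by omega) hsemi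
    have h1 := hspec.1
    omega
  · omega
  · omega

def method_param_slot_indices_py (desc : String) (is_static : Bool) : List Int :=
  if ¬ PySem.Str.startswith desc "(" then []
  else
    let e := PySem.Str.find desc ")"
    if e = -1 then []
    else
      pvLoopA (PySem.Chars.slice desc.toList (some 1) (some e)) 0
        (if is_static then 0 else 1) []

-- ===== PORT B =====

-- first pass of B: one width per parameter; s.lstrip('[') is ported by hand as
-- dropWhile (· == '[') (exact: lstrip with the single char '['), t.startswith('L') /
-- s.find(';') / slices via PySem
def pvWidthsB : List Char → List Int
  | [] => []
  | c :: rest =>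
    if hc : c = '[' then
      if PySem.Chars.startswith ((c :: rest).dropWhile (· == '[')) ['L'] then
        if hsem : PySem.Chars.find ((c :: rest).dropWhile (· == '[')) [';'] = -1 then [1]
        else 1 :: pvWidthsB (PySem.Chars.slice ((c :: rest).dropWhile (· == '['))
          (some (PySem.Chars.find ((c :: rest).dropWhile (· == '[')) [';'] + 1)) none)
      else 1 :: pvWidthsB (PySem.Chars.slice ((c :: rest).dropWhile (· == '[')) (some 1) none)
    else if c = 'L' then
      if hsem : PySem.Chars.find (c :: rest) [';'] = -1 then [1]
      else 1 :: pvWidthsB (PySem.Chars.slice (c :: rest)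
        (some (PySem.Chars.find (c :: rest) [';'] + 1)) none)
    else if c = 'J' ∨ c = 'D' then
      2 :: pvWidthsB rest
    else 1 :: pvWidthsB rest
termination_by s => s.length
decreasing_by
  · have ht : (((c :: rest).dropWhile (· == '[')).length) ≤ rest.length := by
      subst hc
      have h := List.length_dropWhile_le (fun x => x == '[') rest
      simpa [List.dropWhile_cons] using h
    have h0 : (0:Int) ≤ PySem.Chars.find ((c :: rest).dropWhile (· == '[')) [';'] := by
      have := PySem.Chars.neg_one_le_find ((c :: rest).dropWhile (· == '[')) [';']
      omega
    rw [PySem.Chars.slice_eq_listSlice, PySem.List.slice_from _ (by omega)]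
    simp only [List.length_drop, List.length_cons]
    omega
  · have ht : (((c :: rest).dropWhile (· == '[')).length) ≤ rest.length := by
      subst hc
      have h := List.length_dropWhile_le (fun x => x == '[') rest
      simpa [List.dropWhile_cons] using h
    rw [PySem.Chars.slice_eq_listSlice, PySem.List.slice_from _ (by omega)]
    simp only [List.length_drop, List.length_cons]
    omega
  · have h0 : (0:Int) ≤ PySem.Chars.find (c :: rest) [';'] := by
      have := PySem.Chars.neg_one_le_find (c :: rest) [';']
      omega
    rw [PySem.Chars.slice_eq_listSlice, PySem.List.slice_from _ (by omega)]
    simp only [List.length_drop, List.length_cons]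
    omega
  · simp
  · simp

def method_param_slot_indices_py_alt (desc : String) (is_static : Bool) : List Int :=
  if ¬ PySem.Str.startswith desc "(" then []
  else
    let e := PySem.Str.find desc ")"
    if e = -1 then []
    else
      ((pvWidthsB (PySem.Chars.slice desc.toList (some 1) (some e))).foldl
        (fun (p : Int × List Int) w => (p.1 + w, p.2 ++ [p.1]))
        ((if is_static then 0 else 1), [])).2

-- ===== PRECONDITION & SPEC =====
def Spec_method_param_slot_indices_py (desc : String) (is_static : Bool) (out : List Int) : Prop := out = method_param_slot_indices_py_alt desc is_static
instance (desc : String) (is_static : Bool) (out : List Int) : Decidable (Spec_method_param_slot_indices_py desc is_static out) := by unfold Spec_method_param_slot_indices_py; infer_instance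

-- ===== CLAIM (what is proved, stated in full; the proofs are below) =====
def Claim_equal_method_param_slot_indices_py : Prop := ∀ (desc : String) (is_static : Bool), Dom_method_param_slot_indices_py desc is_static → Spec_method_param_slot_indices_py desc is_static (method_param_slot_indices_py desc is_static)

-- ===== LEMMAS AND PROOFS =====

-- the running-slot scan: the pure shape of B's second pass
def pvScanB (s : Int) : List Int → List Int
  | [] => []
  | w :: ws => s :: pvScanB (s + w) ws

theorem pvFoldl_eq_scanB (ws : List Int) (s : Int) (acc : List Int) :
    (ws.foldl (fun (p : Int × List Int) w => (p.1 + w, p.2 ++ [p.1])) (s, acc)).2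
      = acc ++ pvScanB s ws := by
  induction ws generalizing s acc with
  | nil => simp [pvScanB]
  | cons w ws ih => simp [List.foldl, pvScanB, ih]

theorem pvDrop_skipA (args : List Char) (i : Nat) :
    args.drop (pvSkipA args i) = (args.drop i).dropWhile (· == '[') := by
  unfold pvSkipA
  split
  · rename_i h
    have hci : args[i] = '[' := by
      have h2 := h.2
      rw [List.getElem?_eq_getElem h.1] at h2
      exact Option.some.inj h2
    have hdrop : args.drop i = '[' :: args.drop (i + 1) := by
      rw [List.drop_eq_getElem_cons h.1, hci]
    rw [pvDrop_skipA args (i + 1), hdrop]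
    simp [List.dropWhile]
  · rename_i h
    by_cases hi : i < args.length
    · have hne : args[i] ≠ '[' := by
        intro hc
        exact h ⟨hi, by rw [List.getElem?_eq_getElem hi, hc]⟩
      have hbe : ¬ ((args[i] == '[') = true) := by simp [hne]
      rw [List.drop_eq_getElem_cons hi, List.dropWhile_cons, if_neg hbe]
    · rw [List.drop_eq_nil_of_le (by omega)]
      simp
termination_by args.length - i
decreasing_by rename_i h; omega

theorem pvStartswith_head (t : List Char) :
    PySem.Chars.startswith t ['L'] = (t.head? == some 'L') := by
  cases t <;> simp [PySem.Chars.startswith, List.isPrefixOf, eq_comm]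

-- A's loop equals acc ++ B's scan of B's widths of the remaining suffix
theorem pvLoopA_eq (N : Nat) (args : List Char) (i : Nat) (slot : Int) (acc : List Int)
    (hN : args.length - i ≤ N) :
    pvLoopA args i slot acc = acc ++ pvScanB slot (pvWidthsB (args.drop i)) := by
  induction N generalizing i slot acc with
  | zero =>
    have hi : ¬ i < args.length := by omega
    rw [pvLoopA, dif_neg hi, List.drop_eq_nil_of_le (by omega)]
    simp [pvWidthsB, pvScanB]
  | succ N ih =>
    by_cases hi : i < args.length
    · have hdrop : args.drop i = args[i] :: args.drop (i + 1) := List.drop_eq_getElem_cons hi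
      rw [pvLoopA, dif_pos hi]
      by_cases hbr : args[i] = '['
      · -- '[' case
        have hj_le : pvSkipA args i ≤ args.length := pvSkipA_le args i (by omega)
        have hj_ge : i ≤ pvSkipA args i := pvSkipA_ge args i
        have ht : args.drop (pvSkipA args i) = (args.drop i).dropWhile (· == '[') :=
          pvDrop_skipA args i
        have hhead : ((args.drop i).dropWhile (· == '[')).head? = args[pvSkipA args i]? := by
          rw [← ht, List.head?_drop]
        have hW : pvWidthsB (args.drop i) =
            if PySem.Chars.startswith ((args.drop i).dropWhile (· == '[')) ['L'] then
              if PySem.Chars.find ((args.drop i).dropWhile (· == '[')) [';'] = -1 then [1]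
              else 1 :: pvWidthsB (PySem.Chars.slice ((args.drop i).dropWhile (· == '['))
                (some (PySem.Chars.find ((args.drop i).dropWhile (· == '[')) [';'] + 1)) none)
            else 1 :: pvWidthsB (PySem.Chars.slice ((args.drop i).dropWhile (· == '['))
              (some 1) none) := by
          rw [hdrop, pvWidthsB, dif_pos hbr, ← hdrop]
          simp only [dite_eq_ite]
        rw [if_pos hbr, hW]
        by_cases hL : args[pvSkipA args i]? = some 'L'
        · have hsw : PySem.Chars.startswith ((args.drop i).dropWhile (· == '[')) ['L'] = true := by
            rw [pvStartswith_head, hhead, hL]; rfl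
          rw [if_pos hL, if_pos hsw,
            PySem.Chars.findFrom_natCast args [';'] (pvSkipA args i) hj_le, ht]
          by_cases hsem : PySem.Chars.find ((args.drop i).dropWhile (· == '[')) [';'] = -1
          · rw [hsem]
            simp [pvScanB]
          · have h0 : (0:Int) ≤ PySem.Chars.find ((args.drop i).dropWhile (· == '[')) [';'] := by
              have := PySem.Chars.neg_one_le_find ((args.drop i).dropWhile (· == '[')) [';']
              omega
            have hA : ¬ ((if PySem.Chars.find ((args.drop i).dropWhile (· == '[')) [';'] = -1
                then (-1:Int)
                else (pvSkipA args i : Int) +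
                  PySem.Chars.find ((args.drop i).dropWhile (· == '[')) [';']) = -1) := by
              rw [if_neg hsem]; omega
            rw [dif_neg hA, if_neg hsem, if_neg hsem]
            have hdrop2 : args.drop (((pvSkipA args i : Int) +
                  PySem.Chars.find ((args.drop i).dropWhile (· == '[')) [';']).toNat + 1)
                = PySem.Chars.slice ((args.drop i).dropWhile (· == '['))
                    (some (PySem.Chars.find ((args.drop i).dropWhile (· == '[')) [';'] + 1)) none := by
              rw [PySem.Chars.slice_eq_listSlice, PySem.List.slice_from _ (by omega)]
              have hk : ((pvSkipA args i : Int) +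
                  PySem.Chars.find ((args.drop i).dropWhile (· == '[')) [';']).toNat + 1
                  = pvSkipA args i +
                    (PySem.Chars.find ((args.drop i).dropWhile (· == '[')) [';'] + 1).toNat := by
                omega
              rw [hk, ← List.drop_drop, ht]
            rw [ih _ _ _ (by omega), hdrop2]
            simp [pvScanB]
        · have hsw : PySem.Chars.startswith ((args.drop i).dropWhile (· == '[')) ['L'] = false := by
            rw [pvStartswith_head, hhead]
            simp [hL]
          rw [if_neg hL, hsw]
          simp only [Bool.false_eq_true, if_false]
          have hdrop2 : args.drop (pvSkipA args i + 1)
              = PySem.Chars.slice ((args.drop i).dropWhile (· == '[')) (some 1) none := by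
            rw [PySem.Chars.slice_eq_listSlice, PySem.List.slice_from _ (by omega)]
            rw [show ((1:Int)).toNat = 1 from rfl, ← List.drop_drop, ht]
          rw [ih _ _ _ (by omega), hdrop2]
          simp [pvScanB]
      · -- not '['
        rw [if_neg hbr]
        by_cases hLc : args[i] = 'L'
        · rw [if_pos hLc, PySem.Chars.findFrom_natCast args [';'] i (by omega)]
          have hW : pvWidthsB (args.drop i) =
              if PySem.Chars.find (args.drop i) [';'] = -1 then [1]
              else 1 :: pvWidthsB (PySem.Chars.slice (args.drop i)
                (some (PySem.Chars.find (args.drop i) [';'] + 1)) none) := by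
            rw [hdrop, pvWidthsB, dif_neg (by rw [hLc]; decide), if_pos hLc, ← hdrop]
            simp only [dite_eq_ite]
          rw [hW]
          by_cases hsem : PySem.Chars.find (args.drop i) [';'] = -1
          · rw [hsem]
            simp [pvScanB]
          · have h0 : (0:Int) ≤ PySem.Chars.find (args.drop i) [';'] := by
              have := PySem.Chars.neg_one_le_find (args.drop i) [';']
              omega
            have hA : ¬ ((if PySem.Chars.find (args.drop i) [';'] = -1 then (-1:Int)
                else (i : Int) + PySem.Chars.find (args.drop i) [';']) = -1) := by
              rw [if_neg hsem]; omega
            rw [dif_neg hA, if_neg hsem, if_neg hsem]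
            have hdrop2 : args.drop (((i : Int) + PySem.Chars.find (args.drop i) [';']).toNat + 1)
                = PySem.Chars.slice (args.drop i)
                    (some (PySem.Chars.find (args.drop i) [';'] + 1)) none := by
              rw [PySem.Chars.slice_eq_listSlice, PySem.List.slice_from _ (by omega)]
              have hk : ((i : Int) + PySem.Chars.find (args.drop i) [';']).toNat + 1
                  = i + (PySem.Chars.find (args.drop i) [';'] + 1).toNat := by omega
              rw [hk, ← List.drop_drop]
            rw [ih _ _ _ (by omega), hdrop2]
            simp [pvScanB]
        · rw [if_neg hLc]
          by_cases hJD : args[i] = 'J' ∨ args[i] = 'D'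
          · rw [if_pos hJD]
            have hW : pvWidthsB (args.drop i) = 2 :: pvWidthsB (args.drop (i + 1)) := by
              rw [hdrop, pvWidthsB, dif_neg hbr, if_neg hLc, if_pos hJD]
            rw [ih _ _ _ (by omega), hW]
            simp [pvScanB]
          · rw [if_neg hJD]
            have hW : pvWidthsB (args.drop i) = 1 :: pvWidthsB (args.drop (i + 1)) := by
              rw [hdrop, pvWidthsB, dif_neg hbr, if_neg hLc, if_neg hJD]
            rw [ih _ _ _ (by omega), hW]
            simp [pvScanB]
    · rw [pvLoopA, dif_neg hi, List.drop_eq_nil_of_le (by omega)]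
      simp [pvWidthsB, pvScanB]

-- ===== VERDICT (by name: the statement is the Claim_ definition above) =====
theorem method_param_slot_indices_py_spec : Claim_equal_method_param_slot_indices_py := by
  unfold Claim_equal_method_param_slot_indices_py
  intro desc is_static _
  unfold Spec_method_param_slot_indices_py
  unfold method_param_slot_indices_py method_param_slot_indices_py_alt
  by_cases h1 : PySem.Str.startswith desc "(" = true
  · rw [if_neg (not_not_intro h1), if_neg (not_not_intro h1)]
    by_cases h2 : PySem.Str.find desc ")" = -1
    · rw [if_pos h2, if_pos h2]
    · rw [if_neg h2, if_neg h2]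
      rw [pvLoopA_eq
        (PySem.Chars.slice desc.toList (some 1) (some (PySem.Str.find desc ")"))).length
        (PySem.Chars.slice desc.toList (some 1) (some (PySem.Str.find desc ")")))
        0 _ _ (by omega)]
      rw [pvFoldl_eq_scanB, List.drop_zero, List.nil_append]
  · rw [if_pos h1, if_pos h1]
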